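-- pv_equiv track=rewrite | github.com/certik/libfemhub | femhub/triangulation.py | edges_is_closed_curve
-- ===== SOURCE A (Python) =====
-- def edges_is_closed_curve(edges):
--     """
--     Checks to see if the edges form a closed curve.
--
--     The parameter "edges" takes a list of edges. The  Return is True if the
--     list of edges forms a closed curve, otherwise the Return is False.
--
--     This is a useful check before attempting to do a triangulation.
--
--     Example:
--
--     >>> edges_is_closed_curve([(0, 1), (1, 2), (2, 3), (3, 0)])
--     True
--     >>> edges_is_closed_curve([(0, 1), (2, 3), (3, 0)])
--     False
--
--     """
--     e_prev = first = edges[0]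
--     for e in edges[1:]:
--         if e_prev[1] != e[0]:
--             if e_prev[1] == first[0]:
--                 # new loop
--                 first = e
--             else:
--                 return False
--         e_prev = e
--     if e_prev[1] != first[0]:
--         return False
--     return True
-- ===== SOURCE B (Python) =====
-- def edges_is_closed_curve(edges):
--     # Partition the edge list into maximal connected runs, then check
--     # that every run closes (last edge's end == first edge's start).
--     groups = []
--     current = []
--     for e in edges:
--         if current and current[-1][1] != e[0]:
--             groups.append(current)
--             current = [e]
--         else:
--             current.append(e)
--     if current:
--         groups.append(current)
--     return all(g[-1][1] == g[0][0] for g in groups)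
-- ===== Notes on version B (the rewrite author's own statement) =====
-- stated objective: alternative
-- what changed: Replaces A's interleaved state machine (tracking first/e_prev with early return) by a two-phase decomposition: one pass partitions the edges into maximal connected runs, a second pass checks every run closes.
import Mathlib
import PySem

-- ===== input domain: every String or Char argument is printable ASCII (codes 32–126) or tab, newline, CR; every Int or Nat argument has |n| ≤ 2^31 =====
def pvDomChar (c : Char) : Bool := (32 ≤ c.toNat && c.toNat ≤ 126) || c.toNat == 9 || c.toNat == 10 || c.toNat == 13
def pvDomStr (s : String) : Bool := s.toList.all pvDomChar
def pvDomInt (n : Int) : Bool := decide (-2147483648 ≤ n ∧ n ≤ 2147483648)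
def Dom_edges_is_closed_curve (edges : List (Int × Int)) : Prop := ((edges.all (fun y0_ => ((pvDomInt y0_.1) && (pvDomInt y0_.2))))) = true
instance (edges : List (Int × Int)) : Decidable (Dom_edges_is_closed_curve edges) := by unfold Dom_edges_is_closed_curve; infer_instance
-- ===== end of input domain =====

-- B replaces A's interleaved state machine (first/e_prev with early return) by a two-phase
-- decomposition: partition into maximal connected runs, then check every run closes ("alternative").


-- ===== PORT A =====
-- the for-loop over edges[1:] carrying (first, e_prev), with A's early `return False`
def edgesLoopA (first e_prev : Int × Int) : List (Int × Int) → Bool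
  | [] => ¬ (e_prev.2 ≠ first.1)
  | e :: rest =>
    if e_prev.2 ≠ e.1 then
      if e_prev.2 = first.1 then edgesLoopA e e rest
      else false
    else edgesLoopA first e rest

def edges_is_closed_curve (edges : List (Int × Int)) : Bool :=
  match PySem.List.pyGet? edges 0 with
  | none => false   -- unreachable under Pre_: Python raises IndexError on edges[0]
  | some first => edgesLoopA first first (PySem.List.slice edges (some 1) none)

-- ===== PORT B =====
-- phase 1 of Source B: the for-loop building (groups, current), plus the trailing `if current`
def runsB (groups : List (List (Int × Int))) (current : List (Int × Int)) :
    List (Int × Int) → List (List (Int × Int))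
  | [] => if current ≠ [] then groups ++ [current] else groups
  | e :: rest =>
    match current.getLast? with
    | some last =>
        if last.2 ≠ e.1 then runsB (groups ++ [current]) [e] rest
        else runsB groups (current ++ [e]) rest
    | none => runsB groups (current ++ [e]) rest

-- phase 2 of Source B: g[-1][1] == g[0][0]  (groups are never empty, so the fallback is unreachable)
def closedB (g : List (Int × Int)) : Bool :=
  match g.getLast?, g.head? with
  | some l, some h => l.2 == h.1
  | _, _ => true

def edges_is_closed_curve_alt (edges : List (Int × Int)) : Bool :=
  (runsB [] [] edges).all closedB

-- ===== PRECONDITION & SPEC =====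
-- Pre_ excludes only the empty list, on which A raises IndexError at edges[0].
def Pre_edges_is_closed_curve (edges : List (Int × Int)) : Prop := edges ≠ []
instance (edges : List (Int × Int)) : Decidable (Pre_edges_is_closed_curve edges) := by unfold Pre_edges_is_closed_curve; infer_instance
def pvWitness_edges_is_closed_curve : (List (Int × Int)) := [(0, 1), (1, 0)]

def Spec_edges_is_closed_curve (edges : List (Int × Int)) (out : Bool) : Prop := out = edges_is_closed_curve_alt edges
instance (edges : List (Int × Int)) (out : Bool) : Decidable (Spec_edges_is_closed_curve edges out) := by unfold Spec_edges_is_closed_curve; infer_instance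

-- ===== CLAIM (what is proved, stated in full; the proofs are below) =====
def Claim_equal_edges_is_closed_curve : Prop := ∀ (edges : List (Int × Int)), Dom_edges_is_closed_curve edges → Pre_edges_is_closed_curve edges → Spec_edges_is_closed_curve edges (edges_is_closed_curve edges)

-- ===== LEMMAS AND PROOFS =====

-- runsB only ever appends to `groups`
theorem mem_runsB (g : List (Int × Int)) :
    ∀ (rest : List (Int × Int)) (groups : List (List (Int × Int))) (current : List (Int × Int)),
    g ∈ groups → g ∈ runsB groups current rest := by
  intro rest
  induction rest with
  | nil => intro groups current h; simp [runsB]; split <;> simp [h]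
  | cons e t ih =>
      intro groups current h
      simp only [runsB]
      cases hl : current.getLast? with
      | none => exact ih _ _ h
      | some last =>
          by_cases hb : last.2 ≠ e.1
          · simp only [if_pos hb]; exact ih _ _ (by simp [h])
          · simp only [if_neg hb]; exact ih _ _ h

theorem all_false_of_mem {g : List (Int × Int)} {l : List (List (Int × Int))}
    (h : g ∈ l) (hg : closedB g = false) : l.all closedB = false := by
  rw [List.all_eq_false]
  exact ⟨g, h, by simp [hg]⟩

-- main invariant: A's loop from state (first, e_prev) agrees with B's runs construction
theorem loop_eq :
    ∀ (rest : List (Int × Int)) (first e_prev : Int × Int)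
      (groups : List (List (Int × Int))) (current : List (Int × Int)),
      current.head? = some first → current.getLast? = some e_prev →
      (∀ g ∈ groups, closedB g = true) →
      edgesLoopA first e_prev rest = (runsB groups current rest).all closedB := by
  intro rest
  induction rest with
  | nil =>
      intro first e_prev groups current hh hl hg
      have hne : current ≠ [] := by intro h; simp [h] at hh
      simp only [edgesLoopA, runsB, if_pos hne, List.all_append]
      have h1 : groups.all closedB = true := by
        rw [List.all_eq_true]; intro g hgm; exact hg g hgm
      have h2 : closedB current = (e_prev.2 == first.1) := by
        simp [closedB, hh, hl]
      simp [h1, h2]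
      by_cases h : e_prev.2 = first.1 <;> simp [h]
  | cons e t ih =>
      intro first e_prev groups current hh hl hg
      simp only [edgesLoopA, runsB, hl]
      by_cases hb : e_prev.2 ≠ e.1
      · simp only [if_pos hb]
        by_cases hc : e_prev.2 = first.1
        · simp only [if_pos hc]
          refine ih e e (groups ++ [current]) [e] rfl rfl ?_
          intro g hgm
          rcases List.mem_append.1 hgm with h | h
          · exact hg g h
          · simp only [List.mem_singleton] at h
            subst h; simp [closedB, hh, hl, hc]
        · simp only [if_neg hc]
          have hcf : closedB current = false := by
            simp [closedB, hh, hl]; exact hc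
          have hm : current ∈ runsB (groups ++ [current]) [e] t :=
            mem_runsB _ _ _ _ (by simp)
          exact (all_false_of_mem hm hcf).symm
      · simp only [if_neg hb]
        refine ih first e groups (current ++ [e]) ?_ ?_ hg
        · cases current with
          | nil => simp at hh
          | cons a l => simpa using hh
        · simp

-- ===== VERDICT (by name: the statement is the Claim_ definition above) =====
theorem edges_is_closed_curve_spec : Claim_equal_edges_is_closed_curve := by
  intro edges _ hpre
  unfold Spec_edges_is_closed_curve edges_is_closed_curve edges_is_closed_curve_alt
  cases edges with
  | nil => exact absurd rfl hpre
  | cons first rest =>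
      have hget : PySem.List.pyGet? (first :: rest) 0 = some first := by
        simp [PySem.List.pyGet?, PySem.List.pyIdx?]
      have hslice : PySem.List.slice (first :: rest) (some 1) none = rest := by
        simp [PySem.List.slice_from]
      rw [hget, hslice]
      have : runsB [] [] (first :: rest) = runsB [] [first] rest := by
        simp [runsB]
      rw [this]
      exact loop_eq rest first first [] [first] rfl rfl (by intro g h; simp at h)
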